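-- pv_equiv track=rewrite | github.com/gfoot/serialfs | server/fsc.py | split_first_word
-- ===== SOURCE A (Python) =====
-- def split_first_word(command):
-- 	startindex = 0
-- 	while startindex < len(command) and command[startindex] == " ":
-- 		startindex += 1
--
-- 	endindex = startindex
-- 	while endindex < len(command) and command[endindex] != " ":
-- 		endindex += 1
--
-- 	nextindex = endindex
-- 	while nextindex < len(command) and command[nextindex] == " ":
-- 		nextindex += 1
--
-- 	return command[startindex:endindex], nextindex
-- ===== SOURCE B (Python) =====
-- def split_first_word(command):
-- 	stripped = command.lstrip(' ')
-- 	word, _, rest = stripped.partition(' ')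
-- 	nextindex = len(command) - len(rest.lstrip(' '))
-- 	return word, nextindex
-- ===== Notes on version B (the rewrite author's own statement) =====
-- stated objective: idiomatic
-- what changed: Replaces the three explicit index-advancing while loops with standard-library string operations (lstrip/partition/lstrip) done in C, computing nextindex by length arithmetic on the remaining suffix.
import Mathlib
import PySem

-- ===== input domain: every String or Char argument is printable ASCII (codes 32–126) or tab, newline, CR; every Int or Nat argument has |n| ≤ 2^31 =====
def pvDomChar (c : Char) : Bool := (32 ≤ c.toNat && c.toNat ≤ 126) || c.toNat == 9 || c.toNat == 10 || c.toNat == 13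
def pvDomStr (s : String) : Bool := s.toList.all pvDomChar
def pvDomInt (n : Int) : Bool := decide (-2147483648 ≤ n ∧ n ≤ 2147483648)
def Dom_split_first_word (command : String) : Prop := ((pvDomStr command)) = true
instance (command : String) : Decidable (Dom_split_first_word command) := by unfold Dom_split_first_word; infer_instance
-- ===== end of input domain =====

-- B replaces A's three index-advancing while loops with library string operations
-- (lstrip / partition / lstrip) and length arithmetic; objective: idiomatic.

-- ===== PORT A =====
-- one Python 'while i < len(command) and <cond on command[i]>: i += 1' loop, parameterized by the condition
def pvScan (cs : List Char) (p : Char → Bool) (i : Nat) : Nat :=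
  if h : i < cs.length then
    if p cs[i] then pvScan cs p (i + 1) else i
  else i
termination_by cs.length - i
decreasing_by omega

def split_first_word (command : String) : String × Int :=
  let cs := command.toList
  let startindex := pvScan cs (fun c => c == ' ') 0
  let endindex := pvScan cs (fun c => c != ' ') startindex
  let nextindex := pvScan cs (fun c => c == ' ') endindex
  (String.ofList (PySem.List.slice cs (some (startindex : Int)) (some (endindex : Int))), (nextindex : Int))

-- ===== PORT B =====
-- Source B: stripped = command.lstrip(' '); word, _, rest = stripped.partition(' ');
--       nextindex = len(command) - len(rest.lstrip(' '))
def split_first_word_alt (command : String) : String × Int :=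
  let cs := command.toList
  let stripped := cs.dropWhile (fun c => c == ' ')
  let word := stripped.takeWhile (fun c => c != ' ')
  let rest := if stripped.any (fun c => c == ' ') then stripped.drop (word.length + 1) else []
  (String.ofList word, ((cs.length : Int) - ((rest.dropWhile (fun c => c == ' ')).length : Int)))

-- ===== PRECONDITION & SPEC =====
def Spec_split_first_word (command : String) (out : String × Int) : Prop := out = split_first_word_alt command
instance (command : String) (out : String × Int) : Decidable (Spec_split_first_word command out) := by unfold Spec_split_first_word; infer_instance

-- ===== CLAIM (what is proved, stated in full; the proofs are below) =====
def Claim_equal_split_first_word : Prop := ∀ (command : String), Dom_split_first_word command → Spec_split_first_word command (split_first_word command)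

-- ===== LEMMAS AND PROOFS =====

-- the while-loop helper advances exactly over the takeWhile prefix starting at i
lemma pvScan_eq_aux (cs : List Char) (p : Char → Bool) :
    ∀ n i, cs.length - i = n → i ≤ cs.length →
      pvScan cs p i = i + ((cs.drop i).takeWhile p).length := by
  intro n
  induction n with
  | zero =>
    intro i hn hle
    have : i = cs.length := by omega
    subst this
    rw [pvScan]
    simp
  | succ m ih =>
    intro i hn hle
    have hlt : i < cs.length := by omega
    rw [pvScan]
    rw [dif_pos hlt]
    rw [List.drop_eq_getElem_cons hlt]
    by_cases hp : p cs[i]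
    · rw [if_pos hp, List.takeWhile_cons_of_pos hp]
      rw [ih (i + 1) (by omega) (by omega)]
      simp; omega
    · rw [if_neg hp, List.takeWhile_cons_of_neg hp]
      simp

lemma pvScan_eq (cs : List Char) (p : Char → Bool) (i : Nat) (h : i ≤ cs.length) :
    pvScan cs p i = i + ((cs.drop i).takeWhile p).length :=
  pvScan_eq_aux cs p (cs.length - i) i rfl h

lemma dropWhile_eq_drop {α : Type} (p : α → Bool) (l : List α) :
    l.dropWhile p = l.drop (l.takeWhile p).length := by
  induction l with
  | nil => simp
  | cons c ls ih =>
    by_cases h : p c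
    · simp [h, ih]
    · simp [h]

lemma take_takeWhile {α : Type} (p : α → Bool) (l : List α) :
    l.take (l.takeWhile p).length = l.takeWhile p := by
  induction l with
  | nil => simp
  | cons c ls ih =>
    by_cases h : p c
    · simp [h, ih]
    · simp [h]

lemma len_takeWhile_add {α : Type} (p : α → Bool) (l : List α) :
    (l.takeWhile p).length + (l.dropWhile p).length = l.length := by
  rw [← List.length_append, List.takeWhile_append_dropWhile]

-- if l contains a space, dropping the non-space prefix lands exactly on a space
lemma dropWhile_ne_space (l : List Char) (h : l.any (fun c => c == ' ') = true) :
    l.dropWhile (fun c => c != ' ') = ' ' :: l.drop ((l.takeWhile (fun c => c != ' ')).length + 1) := by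
  induction l with
  | nil => simp at h
  | cons c ls ih =>
    by_cases hc : c = ' '
    · subst hc
      simp
    · have hne : (c != ' ') = true := by simp [hc]
      have h' : ls.any (fun c => c == ' ') = true := by
        simp [List.any_cons, hc] at h; simpa using h
      simp only [List.dropWhile_cons, List.takeWhile_cons, hne, if_pos]
      rw [ih h']
      simp

-- ===== VERDICT (by name: the statement is the Claim_ definition above) =====
theorem split_first_word_spec : Claim_equal_split_first_word := by
  intro command _
  unfold Spec_split_first_word split_first_word split_first_word_alt
  simp only []
  set cs := command.toList with hcs
  set S : Char → Bool := fun c => c == ' ' with hS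
  set N : Char → Bool := fun c => c != ' ' with hN
  set stripped := cs.dropWhile S with hstr
  set word := stripped.takeWhile N with hword
  have hstart : pvScan cs S 0 = (cs.takeWhile S).length := by
    rw [pvScan_eq cs S 0 (by omega)]; simp
  have hdropstart : cs.drop (cs.takeWhile S).length = stripped := by
    rw [hstr, dropWhile_eq_drop]
  have hlentw : (cs.takeWhile S).length ≤ cs.length := by
    have := len_takeWhile_add S cs; omega
  have hend : pvScan cs N (pvScan cs S 0) = (cs.takeWhile S).length + word.length := by
    rw [hstart, pvScan_eq cs N _ hlentw, hdropstart, ← hword]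
  -- the word component
  have hslice : PySem.List.slice cs (some ((pvScan cs S 0 : Nat) : Int))
      (some ((pvScan cs N (pvScan cs S 0) : Nat) : Int)) = word := by
    rw [PySem.List.slice_natCast, hend, hstart, hdropstart]
    have h1 : (cs.takeWhile S).length + word.length - (cs.takeWhile S).length = word.length := by
      omega
    rw [h1, hword, take_takeWhile]
  -- the index component
  set t := stripped.drop word.length with ht
  have htw : t = stripped.dropWhile N := by rw [ht, hword, ← dropWhile_eq_drop]
  have hlen1 : (cs.takeWhile S).length + stripped.length = cs.length := by
    have := len_takeWhile_add S cs; rw [← hstr] at this; omega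
  have hlen2 : word.length + t.length = stripped.length := by
    have h1 := len_takeWhile_add N stripped
    rw [hword, htw]; exact h1
  have hdropend : cs.drop ((cs.takeWhile S).length + word.length) = t := by
    rw [← List.drop_drop, hdropstart, ht]
  have hnext : pvScan cs S (pvScan cs N (pvScan cs S 0))
      = (cs.takeWhile S).length + word.length + (t.takeWhile S).length := by
    rw [hend, pvScan_eq cs S _ (by omega), hdropend]
  -- relate t's space prefix to B's rest
  set rest := (if stripped.any S then stripped.drop (word.length + 1) else []) with hrest
  have hkey : (t.takeWhile S).length + (rest.dropWhile S).length = t.length := by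
    by_cases hany : stripped.any S = true
    · have hts : t = ' ' :: stripped.drop (word.length + 1) := by
        rw [htw]; exact dropWhile_ne_space stripped hany
      rw [hrest, if_pos hany]
      have e1 : (t.takeWhile S).length
          = ((stripped.drop (word.length + 1)).takeWhile S).length + 1 := by
        rw [hts]; simp [hS]
      have e2 : (t.dropWhile S).length
          = ((stripped.drop (word.length + 1)).dropWhile S).length := by
        rw [hts]; simp [hS]
      have e3 := len_takeWhile_add S t
      omega
    · have hall : stripped.takeWhile N = stripped := by
        apply List.takeWhile_eq_self_iff.mpr
        intro c hc
        simp only [hN, bne_iff_ne, ne_eq]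
        intro hcsp
        subst hcsp
        exact hany (List.any_eq_true.mpr ⟨' ', hc, by simp [hS]⟩)
      have hteq : t = [] := by
        rw [htw, dropWhile_eq_drop, hall, List.drop_length]
      rw [hrest, if_neg hany, hteq]
      simp
  simp only [Prod.mk.injEq]
  refine ⟨by rw [hslice], ?_⟩
  rw [hnext]
  push_cast
  omega
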